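-- pv_equiv track=rewrite | github.com/shreyamahajan5/HealthGeek-Stress | stress.py | calculate_pss_score
-- ===== SOURCE A (Python) =====
-- def reverse_score(score):
--     return 4 - score
--
-- def calculate_pss_score(answers):
--     reversed_indices = [3, 4, 6, 7]  # Indices of questions to reverse score
--     total_score = 0
--     for i, ans in enumerate(answers):
--         if i in reversed_indices:
--             ans = reverse_score(ans)
--         total_score += ans
--     return total_score
-- ===== SOURCE B (Python) =====
-- def calculate_pss_score(answers):
--     answers = list(answers)
--     base = sum(answers)
--     return base + sum(4 - 2 * answers[i] for i in (3, 4, 6, 7) if i < len(answers))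
-- ===== Notes on version B (the rewrite author's own statement) =====
-- stated objective: simpler
-- what changed: Replaces the per-element membership-test-and-branch loop with a plain sum of all answers plus a separate correction term 4-2*answers[i] over only the four fixed reversed indices that exist.
import Mathlib
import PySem

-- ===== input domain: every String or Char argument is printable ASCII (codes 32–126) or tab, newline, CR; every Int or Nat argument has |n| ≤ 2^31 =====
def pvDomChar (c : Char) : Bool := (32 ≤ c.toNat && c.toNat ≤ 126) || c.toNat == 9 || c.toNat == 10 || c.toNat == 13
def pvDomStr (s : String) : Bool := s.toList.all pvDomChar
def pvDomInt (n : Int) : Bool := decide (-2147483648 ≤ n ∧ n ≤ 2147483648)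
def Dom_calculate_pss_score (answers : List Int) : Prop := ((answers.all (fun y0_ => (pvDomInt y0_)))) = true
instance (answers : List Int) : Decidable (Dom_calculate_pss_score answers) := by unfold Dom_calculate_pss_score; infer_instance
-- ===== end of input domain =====

-- B sums all answers once and adds a correction 4 - 2*a at the four fixed reversed
-- indices, instead of A's per-element membership branch inside the loop (objective: simpler).

-- ===== PORT A =====
-- loop over enumerate(answers): if i in [3,4,6,7] then ans := 4 - ans; accumulate
def pvCalcALoop (i : Int) (total : Int) : List Int → Int
  | [] => total
  | a :: rest =>
      pvCalcALoop (i + 1) (total + (if i ∈ ([3, 4, 6, 7] : List Int) then 4 - a else a)) rest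

def calculate_pss_score (answers : List Int) : Int :=
  pvCalcALoop 0 0 answers

-- ===== PORT B =====
def calculate_pss_score_alt (answers : List Int) : Int :=
  let base := answers.sum
  base + (([3, 4, 6, 7] : List Nat).foldl
    (fun acc i => if i < answers.length then acc + (4 - 2 * answers.getD i 0) else acc) 0)

-- ===== PRECONDITION & SPEC =====
def Spec_calculate_pss_score (answers : List Int) (out : Int) : Prop := out = calculate_pss_score_alt answers
instance (answers : List Int) (out : Int) : Decidable (Spec_calculate_pss_score answers out) := by unfold Spec_calculate_pss_score; infer_instance

-- ===== CLAIM (what is proved, stated in full; the proofs are below) =====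
def Claim_equal_calculate_pss_score : Prop := ∀ (answers : List Int), Dom_calculate_pss_score answers → Spec_calculate_pss_score answers (calculate_pss_score answers)

-- ===== LEMMAS AND PROOFS =====

-- sum with the per-index adjustment, written as a structural recursion starting at index i
def pvSumF (i : Int) : List Int → Int
  | [] => 0
  | a :: rest => (if i ∈ ([3, 4, 6, 7] : List Int) then 4 - a else a) + pvSumF (i + 1) rest

theorem pvCalcALoop_eq : ∀ (l : List Int) (i total : Int),
    pvCalcALoop i total l = total + pvSumF i l := by
  intro l
  induction l with
  | nil => intro i total; simp [pvCalcALoop, pvSumF]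
  | cons a rest ih =>
      intro i total
      simp [pvCalcALoop, pvSumF, ih]
      ring

theorem pvSumF_ge8 : ∀ (l : List Int) (i : Int), 8 ≤ i → pvSumF i l = l.sum := by
  intro l
  induction l with
  | nil => intro i _; simp [pvSumF]
  | cons a rest ih =>
      intro i hi
      have hni : i ∉ ([3, 4, 6, 7] : List Int) := by
        simp only [List.mem_cons, List.not_mem_nil, or_false]
        omega
      simp [pvSumF, hni, ih (i + 1) (by omega)]

theorem pvAlt_eq_sumF : ∀ (answers : List Int),
    calculate_pss_score_alt answers = pvSumF 0 answers := by
  intro answers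
  match answers with
  | [] => decide
  | [a] => simp [calculate_pss_score_alt, pvSumF, List.foldl]; try ring
  | [a, b] => simp [calculate_pss_score_alt, pvSumF, List.foldl]; try ring
  | [a, b, c] => simp [calculate_pss_score_alt, pvSumF, List.foldl]; try ring
  | [a, b, c, d] => simp [calculate_pss_score_alt, pvSumF, List.foldl, List.getD]; ring
  | [a, b, c, d, e] => simp [calculate_pss_score_alt, pvSumF, List.foldl, List.getD]; ring
  | [a, b, c, d, e, f] => simp [calculate_pss_score_alt, pvSumF, List.foldl, List.getD]; ring
  | [a, b, c, d, e, f, g] => simp [calculate_pss_score_alt, pvSumF, List.foldl, List.getD]; ring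
  | a :: b :: c :: d :: e :: f :: g :: h :: rest =>
      have h8 : pvSumF 8 rest = rest.sum := pvSumF_ge8 rest 8 (by omega)
      simp [calculate_pss_score_alt, pvSumF, List.foldl, List.getD, h8]
      ring

-- ===== VERDICT (by name: the statement is the Claim_ definition above) =====
theorem calculate_pss_score_spec : Claim_equal_calculate_pss_score := by
  intro answers _
  unfold Spec_calculate_pss_score calculate_pss_score
  rw [pvCalcALoop_eq, pvAlt_eq_sumF]
  simp
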